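-- pv_equiv track=rewrite | github.com/jmcda001/AdventOfCode2019 | day5-SunnywithaChanceofAsteroids/TEST.py | instructionDecode
-- ===== SOURCE A (Python) =====
-- from typing import List, NamedTuple
--
-- class Instruction(NamedTuple):
--     opcode: str
--     mode1: bool
--     mode2: bool
--     mode3: bool
--
-- def instructionDecode(opcode: int)->Instruction:
--     opcodeList = [i for i in str(opcode)]
--     extension = []
--     if len(opcodeList) < 5:
--         extension = ['0']*(5-len(opcodeList))
--     opcodeList = extension+opcodeList
--     opcodeValue = ''.join(opcodeList[3:])
--     modes = bool(int(opcodeList[2])),bool(int(opcodeList[1])),bool(int(opcodeList[0]))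
--     instruction = Instruction(opcodeValue,*modes)
--     return instruction
-- ===== SOURCE B (Python) =====
-- def instructionDecode(opcode: int):
--     # Peel the decimal digits from the low end into a little-endian list,
--     # pad to at least five digits, then read the modes and the value part off that list.
--     digits = []
--     n = opcode
--     while n > 0:
--         digits.append(n % 10)
--         n //= 10
--     while len(digits) < 5:
--         digits.append(0)
--     value = ''.join(str(d) for d in reversed(digits[:len(digits) - 3]))
--     return (value, digits[-3] != 0, digits[-2] != 0, digits[-1] != 0)
-- ===== Notes on version B (the rewrite author's own statement) =====
-- stated objective: alternative
-- what changed: B peels the decimal digits arithmetically from the low end into a little-endian digit list and reads the modes and value off that list, instead of A's convert-to-string, pad-a-char-list, slice-and-reparse-with-int(); Pre_ excludes negative opcodes, outside the intcode domain, where A raises ValueError (any opcode <= -10) or absorbs the '-' sign into the zero-padded slots (-9..-1).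
-- outside the precondition, e.g. on instructionDecode(-1): A returns ('-1', False, False, False), B returns ('00', False, False, False); on instructionDecode(-10): A raises ValueError, B returns ('00', False, False, False)
import Mathlib
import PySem

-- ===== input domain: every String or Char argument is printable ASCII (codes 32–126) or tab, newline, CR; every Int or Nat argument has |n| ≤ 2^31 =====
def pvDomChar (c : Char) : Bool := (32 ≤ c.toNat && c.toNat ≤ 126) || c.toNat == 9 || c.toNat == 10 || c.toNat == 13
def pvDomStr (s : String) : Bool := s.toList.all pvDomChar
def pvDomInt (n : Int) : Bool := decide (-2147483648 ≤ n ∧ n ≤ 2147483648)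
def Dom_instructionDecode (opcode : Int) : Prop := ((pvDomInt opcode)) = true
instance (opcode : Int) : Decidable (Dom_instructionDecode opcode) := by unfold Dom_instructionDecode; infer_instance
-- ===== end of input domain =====

-- B peels the decimal digits arithmetically from the low end instead of A's
-- string/char-list padding-and-reparsing (objective: alternative).

-- ===== PORT A =====
def instructionDecode (opcode : Int) : String × Bool × Bool × Bool :=
  let opcodeList := PySem.Int.toChars opcode
  let extension := if opcodeList.length < 5 then List.replicate (5 - opcodeList.length) '0' else []
  let l := extension ++ opcodeList
  let opcodeValue := String.mk (PySem.List.slice l (some 3) none)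
  -- bool(int(opcodeList[i])): ofChars? is none exactly where Python's int() raises ValueError (excluded by Pre_)
  let d2 := ((PySem.Int.ofChars? [(PySem.List.pyGet? l 2).getD '0']).getD 0)
  let d1 := ((PySem.Int.ofChars? [(PySem.List.pyGet? l 1).getD '0']).getD 0)
  let d0 := ((PySem.Int.ofChars? [(PySem.List.pyGet? l 0).getD '0']).getD 0)
  (opcodeValue, d2 != 0, d1 != 0, d0 != 0)

-- ===== PORT B =====
-- Source B's first while loop: peel digits from the low end
def pvPeel (n : Int) (acc : List Int) : List Int :=
  if 0 < n then pvPeel (PySem.Int.floordiv n 10) (acc ++ [PySem.Int.mod n 10]) else acc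
  termination_by n.toNat
  decreasing_by
    rename_i h
    rw [PySem.Int.floordiv_eq_ediv_of_pos (by norm_num)]
    omega

-- Source B's second while loop: pad with zeros to length 5
def pvPad5 (acc : List Int) : List Int :=
  if acc.length < 5 then pvPad5 (acc ++ [0]) else acc
  termination_by 5 - acc.length
  decreasing_by simp; omega

def instructionDecode_alt (opcode : Int) : String × Bool × Bool × Bool :=
  let digits := pvPad5 (pvPeel opcode [])
  let value := String.mk (PySem.Chars.join []
    ((PySem.List.slice digits none (some (PySem.List.len digits - 3))).reverse.map PySem.Int.toChars))
  (value,
   PySem.List.pyGetD digits (-3) 0 != 0,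
   PySem.List.pyGetD digits (-2) 0 != 0,
   PySem.List.pyGetD digits (-1) 0 != 0)

-- ===== PRECONDITION & SPEC =====
-- Pre_ excludes negative opcodes, which lie outside the intcode opcode domain: for opcode ≤ -10 A
-- raises ValueError (int() of the '-' sign character), and for -9..-1 A's value absorbs the sign
-- into the zero-padded slots — an accident of the char-list padding no caller specifies.
def Pre_instructionDecode (opcode : Int) : Prop := 0 ≤ opcode
instance (opcode : Int) : Decidable (Pre_instructionDecode opcode) := by unfold Pre_instructionDecode; infer_instance
def pvWitness_instructionDecode : Int := 1002

def Spec_instructionDecode (opcode : Int) (out : String × Bool × Bool × Bool) : Prop := out = instructionDecode_alt opcode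
instance (opcode : Int) (out : String × Bool × Bool × Bool) : Decidable (Spec_instructionDecode opcode out) := by unfold Spec_instructionDecode; infer_instance

-- ===== CLAIM (what is proved, stated in full; the proofs are below) =====
def Claim_equal_instructionDecode : Prop := ∀ (opcode : Int), Dom_instructionDecode opcode → Pre_instructionDecode opcode → Spec_instructionDecode opcode (instructionDecode opcode)

-- ===== LEMMAS AND PROOFS =====

-- big-endian decimal digits of n, the digits of A's str(n) for n ≥ 0
def pvDigs (n : Nat) : List Nat :=
  if n < 10 then [n] else pvDigs (n / 10) ++ [n % 10]

theorem pvDigs_lt_ten (n : Nat) : ∀ d ∈ pvDigs n, d < 10 := by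
  fun_induction pvDigs n with
  | case1 n h => simpa using h
  | case2 n h ih =>
    intro d hd
    rcases List.mem_append.mp hd with h1 | h1
    · exact ih d h1
    · simp at h1; omega

theorem toDigitsCore_acc (f : Nat) : ∀ (n : Nat) (ds : List Char), n < f →
    Nat.toDigitsCore 10 f n ds = Nat.toDigitsCore 10 f n [] ++ ds := by
  induction f with
  | zero => intro n ds h; omega
  | succ f ih =>
    intro n ds h
    simp only [Nat.toDigitsCore]
    by_cases h0 : n / 10 = 0
    · simp [h0]
    · simp only [h0, if_false]
      have h10 : 10 ≤ n := by
        rcases Nat.lt_or_ge n 10 with hc | hc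
        · exact absurd (Nat.div_eq_of_lt hc) h0
        · exact hc
      have hlt : n / 10 < f := by
        have := Nat.div_lt_self (by omega : 0 < n) (by norm_num : 1 < 10)
        omega
      rw [ih (n/10) _ hlt, ih (n/10) [_] hlt, List.append_assoc]
      simp

theorem toDigitsCore_fuel (f f' : Nat) : ∀ (n : Nat) (ds : List Char), n < f → n < f' →
    Nat.toDigitsCore 10 f n ds = Nat.toDigitsCore 10 f' n ds := by
  induction f generalizing f' with
  | zero => intro n ds h _; omega
  | succ f ih =>
    intro n ds h h'
    cases f' with
    | zero => omega
    | succ f' =>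
      simp only [Nat.toDigitsCore]
      by_cases h0 : n / 10 = 0
      · simp [h0]
      · simp only [h0, if_false]
        have h10 : 10 ≤ n := by
          rcases Nat.lt_or_ge n 10 with hc | hc
          · exact absurd (Nat.div_eq_of_lt hc) h0
          · exact hc
        have hlt : n / 10 < n := Nat.div_lt_self (by omega) (by norm_num)
        exact ih f' (n/10) _ (by omega) (by omega)

theorem toDigits_eq_pvDigs (n : Nat) : Nat.toDigits 10 n = (pvDigs n).map Nat.digitChar := by
  fun_induction pvDigs n with
  | case1 n h =>
    have h0 : n / 10 = 0 := Nat.div_eq_of_lt h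
    simp [Nat.toDigits, Nat.toDigitsCore, h0, Nat.mod_eq_of_lt h]
  | case2 n h ih =>
    have h10 : 10 ≤ n := by omega
    have h0 : ¬ n / 10 = 0 := by
      have := Nat.le_div_iff_mul_le (k := 10) (by norm_num) |>.mpr (by omega : 1 * 10 ≤ n)
      omega
    rw [Nat.toDigits]
    simp only [Nat.toDigitsCore, h0, if_false]
    rw [toDigitsCore_acc _ _ _ (by have := Nat.div_lt_self (by omega : 0 < n) (by norm_num : 1 < 10); omega),
        toDigitsCore_fuel n (n/10+1) _ _ (Nat.div_lt_self (by omega) (by norm_num)) (by omega)]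
    rw [← Nat.toDigits, ih]
    simp

theorem ofChars_digitChar (d : Nat) (hd : d < 10) :
    PySem.Int.ofChars? [Nat.digitChar d] = some (d : Int) := by
  interval_cases d <;> decide

theorem toChars_natCast (m : Nat) : PySem.Int.toChars (m : Int) = Nat.toDigits 10 m := by
  simp [PySem.Int.toChars]

theorem toChars_single (d : Nat) (hd : d < 10) :
    PySem.Int.toChars ((d : Nat) : Int) = [Nat.digitChar d] := by
  rw [toChars_natCast, toDigits_eq_pvDigs, pvDigs, if_pos hd]
  simp

theorem pvPeel_eq (m : Nat) (hm : 0 < m) (acc : List Int) :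
    pvPeel (m : Int) acc = acc ++ ((pvDigs m).reverse.map (fun d => ((d : Nat) : Int))) := by
  fun_induction pvDigs m generalizing acc with
  | case1 n h =>
    rw [pvPeel, if_pos (by exact_mod_cast hm)]
    rw [show (10:Int) = ((10:Nat):Int) from rfl, PySem.Int.floordiv_natCast,
        PySem.Int.mod_natCast, Nat.div_eq_of_lt h, Nat.mod_eq_of_lt h]
    rw [pvPeel, if_neg (by simp)]
    simp
  | case2 n h ih =>
    rw [pvPeel, if_pos (by exact_mod_cast hm)]
    rw [show (10:Int) = ((10:Nat):Int) from rfl, PySem.Int.floordiv_natCast,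
        PySem.Int.mod_natCast]
    rw [ih (Nat.div_pos (by omega) (by norm_num))]
    simp

theorem pvPad5_eq (acc : List Int) : pvPad5 acc = acc ++ List.replicate (5 - acc.length) (0 : Int) := by
  fun_induction pvPad5 acc with
  | case1 acc h ih =>
    rw [ih]
    have : 5 - acc.length = (5 - (acc ++ [0]).length) + 1 := by simp; omega
    rw [List.append_assoc, this, List.replicate_succ]
    simp
  | case2 acc h => rw [Nat.sub_eq_zero_of_le (by omega)]; simp

theorem pvPeel_nonpos (n : Int) (hn : n ≤ 0) (acc : List Int) : pvPeel n acc = acc := by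
  rw [pvPeel, if_neg (by omega)]

theorem alt_eval_nonpos (n : Int) (hn : n ≤ 0) :
    instructionDecode_alt n = ("00", false, false, false) := by
  unfold instructionDecode_alt
  rw [pvPeel_nonpos n hn, pvPad5_eq]
  decide

theorem instructionDecode_eq_alt (m : Nat) :
    instructionDecode (m : Int) = instructionDecode_alt (m : Int) := by
  rcases Nat.eq_zero_or_pos m with rfl | hm
  · rw [Nat.cast_zero, alt_eval_nonpos 0 le_rfl]
    decide
  unfold instructionDecode instructionDecode_alt
  rw [toChars_natCast, toDigits_eq_pvDigs, pvPeel_eq m hm, pvPad5_eq]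
  simp only [List.nil_append]
  set L := (pvDigs m).length with hLdef
  have hL1 : 1 ≤ L := by rw [hLdef, pvDigs]; split <;> simp
  set W := max L 5 with hWdef
  have hW5 : 5 ≤ W := le_max_right _ _
  have hWL : L ≤ W := le_max_left _ _
  set P := List.replicate (W - L) 0 ++ pvDigs m with hPdef
  have hPlen : P.length = W := by
    simp only [hPdef, List.length_append, List.length_replicate, ← hLdef]
    omega
  have hPd : ∀ d ∈ P, d < 10 := by
    intro d hd
    rcases List.mem_append.mp hd with h1 | h1
    · rw [List.eq_of_mem_replicate h1]; norm_num
    · exact pvDigs_lt_ten m d h1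
  -- A's padded char list is the image of P
  have hpadA : (if (List.map Nat.digitChar (pvDigs m)).length < 5 then
        List.replicate (5 - (List.map Nat.digitChar (pvDigs m)).length) '0' else [])
        ++ List.map Nat.digitChar (pvDigs m) = P.map Nat.digitChar := by
    rw [hPdef, List.map_append, List.map_replicate]
    simp only [List.length_map, ← hLdef]
    by_cases h5 : L < 5
    · rw [if_pos h5, show W = 5 by omega, (show Nat.digitChar 0 = '0' by decide)]
    · rw [if_neg h5, show W - L = 0 by omega]; simp
  rw [hpadA]
  -- B's digit list is the reverse of P cast to Int
  have hrevlen : ((pvDigs m).reverse.map (fun d => ((d : Nat) : Int))).length = L := by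
    simp only [List.length_map, List.length_reverse]
    exact hLdef.symm
  have hB : (pvDigs m).reverse.map (fun d => ((d : Nat) : Int))
        ++ List.replicate (5 - ((pvDigs m).reverse.map (fun d => ((d : Nat) : Int))).length) (0:Int)
      = (P.map (fun d => ((d : Nat) : Int))).reverse := by
    rw [hrevlen, hPdef, List.map_append, List.reverse_append, List.map_replicate,
        List.map_reverse, List.reverse_replicate]
    congr 2
    omega
  rw [hB]
  set Q := (P.map (fun d => ((d : Nat) : Int))).reverse with hQdef
  have hQlen : Q.length = W := by simp [hQdef, hPlen]
  -- modes: Q[-k] = P[k-1]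
  have hmode : ∀ (k : Nat) (hk : 0 < k) (hk3 : k ≤ 3),
      PySem.List.pyGetD Q (-(k : Int)) 0 = ((P[k-1]'(by rw [hPlen]; omega) : Nat) : Int) := by
    intro k hk hk3
    rw [PySem.List.pyGetD_neg_natCast Q k 0 hk (by rw [hQlen]; omega)]
    have hidx : W - 1 - (W - k) = k - 1 := by omega
    simp only [hQdef, List.getElem_reverse, List.length_reverse, List.length_map, hPlen,
      hidx, List.getElem_map]
  have hm3 := hmode 3 (by omega) (by omega)
  have hm2 := hmode 2 (by omega) (by omega)
  have hm1 := hmode 1 (by omega) (by omega)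
  norm_num at hm3 hm2 hm1
  rw [hm3, hm2, hm1]
  -- A's modes: pyGet? char at i then int()
  have hA : ∀ (i : Nat) (hi : i < 3),
      ((PySem.Int.ofChars? [(PySem.List.pyGet? (P.map Nat.digitChar) (i : Int)).getD '0']).getD 0)
        = ((P[i]'(by rw [hPlen]; omega) : Nat) : Int) := by
    intro i hi
    rw [PySem.List.pyGet?_natCast,
        List.getElem?_eq_getElem (by simp [hPlen]; omega)]
    simp only [Option.getD_some, List.getElem_map]
    rw [ofChars_digitChar _ (hPd _ (List.getElem_mem _))]
    rfl
  have hA2 := hA 2 (by omega)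
  have hA1 := hA 1 (by omega)
  have hA0 := hA 0 (by omega)
  norm_num at hA2 hA1 hA0
  rw [hA2, hA1, hA0]
  -- value strings
  have hlenQ : PySem.List.len Q - 3 = ((W - 3 : Nat) : Int) := by
    rw [PySem.List.len_eq, hQlen]; omega
  rw [hlenQ, PySem.List.slice_to_natCast, PySem.List.slice_from _ (by norm_num : (0:Int) ≤ 3)]
  have htake : Q.take (W - 3) = ((P.map (fun d => ((d : Nat) : Int))).drop 3).reverse := by
    have hlen3 : (P.map (fun d : Nat => ((d : Nat) : Int))).length - (W - 3) = 3 := by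
      simp only [List.length_map, hPlen]; omega
    rw [hQdef, List.take_reverse, hlen3]
  rw [htake, List.reverse_reverse, show Int.toNat 3 = 3 from rfl]
  have hmaps : ((P.map fun d => ((d : Nat) : Int)).drop 3).map PySem.Int.toChars
      = ((P.map Nat.digitChar).drop 3).map (fun c => [c]) := by
    rw [← List.map_drop, ← List.map_drop, List.map_map, List.map_map]
    apply List.map_congr_left
    intro d hd
    have hd10 : d < 10 := hPd d (List.mem_of_mem_drop hd)
    simp [Function.comp, toChars_single d hd10]
  rw [hmaps, PySem.Chars.join_nil_singletons]

-- ===== VERDICT (by name: the statement is the Claim_ definition above) =====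
theorem instructionDecode_spec : Claim_equal_instructionDecode := by
  intro opcode hdom hpre
  unfold Spec_instructionDecode
  obtain ⟨m, rfl⟩ := Int.eq_ofNat_of_zero_le hpre
  exact instructionDecode_eq_alt m
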